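-- pv_equiv track=rewrite | github.com/hoyoungAhn99/datadrift_1 | drift_detection/HierOOD/GM-ProHOC/libs/hierarchy.py | _trim_hierarchy
-- ===== SOURCE A (Python) =====
-- def _trim_hierarchy(train_classes, child2parent):
--
--     keep_classes = set()
--
--     for train_class in train_classes:
--         current_node = train_class
--         while current_node:
--             keep_classes.add(current_node)
--             current_node = child2parent.get(current_node)
--
--     trimmed_node_list = sorted(list(keep_classes))
--
--     return trimmed_node_list
-- ===== SOURCE B (Python) =====
-- def _trim_hierarchy(train_classes, child2parent):
--     keep_classes = set()
--     frontier = {c for c in train_classes if c}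
--     while frontier:
--         keep_classes |= frontier
--         next_frontier = set()
--         for node in frontier:
--             parent = child2parent.get(node)
--             if parent and parent not in keep_classes:
--                 next_frontier.add(parent)
--         frontier = next_frontier
--     return sorted(keep_classes)
-- ===== Notes on version B (the rewrite author's own statement) =====
-- stated objective: alternative
-- what changed: Replaces A's per-class ancestor-chain walks (each train class re-traverses its whole parent chain) by a single breadth-first frontier/worklist closure over sets seeded with all truthy train classes, visiting each node's parent lookup once per wave.
-- outside the precondition, e.g. on _trim_hierarchy([1], {2: 3, 3: 2}): A returns [1], B returns [1]; on _trim_hierarchy([1], {1: 1}): A does not finish within the time limit, B returns [1]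
import Mathlib
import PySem

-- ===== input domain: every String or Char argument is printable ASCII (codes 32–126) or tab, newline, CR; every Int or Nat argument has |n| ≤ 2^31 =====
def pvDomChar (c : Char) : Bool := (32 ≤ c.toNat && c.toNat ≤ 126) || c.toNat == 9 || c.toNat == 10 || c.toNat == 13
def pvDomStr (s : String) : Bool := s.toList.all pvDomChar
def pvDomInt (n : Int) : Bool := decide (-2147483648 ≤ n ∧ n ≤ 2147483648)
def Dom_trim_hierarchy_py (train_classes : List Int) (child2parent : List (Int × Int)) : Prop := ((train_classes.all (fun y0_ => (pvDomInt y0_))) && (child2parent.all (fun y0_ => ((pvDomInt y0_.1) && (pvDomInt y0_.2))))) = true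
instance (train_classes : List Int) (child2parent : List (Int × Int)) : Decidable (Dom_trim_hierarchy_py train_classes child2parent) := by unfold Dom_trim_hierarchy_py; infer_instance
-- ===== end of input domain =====

-- B replaces A's per-class ancestor-chain walks by a single breadth-first frontier closure over sets (objective: alternative).
-- Shared helper: Python's child2parent.get(n) (dict lookup, None when absent).
def pvGet (cp : List (Int × Int)) (n : Int) : Option Int := (PySem.Dict.mk cp).get? n

-- ===== PORT A =====
-- the 'while current_node:' loop of A: add the node, step to its parent; fuel only makes it total
def chainA (cp : List (Int × Int)) : Nat → PySem.Set Int → Option Int → PySem.Set Int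
  | 0, keep, _ => keep
  | f+1, keep, cur =>
      match cur with
      | none => keep
      | some n => if n ≠ 0 then chainA cp f (PySem.Set.add keep n) (pvGet cp n) else keep

def trim_hierarchy_py (train_classes : List Int) (child2parent : List (Int × Int)) : List Int :=
  let keep := train_classes.foldl
    (fun keep t => chainA child2parent (child2parent.length + 2) keep (some t)) PySem.Set.empty
  PySem.List.sorted keep (fun x => x) false

-- ===== PORT B =====
-- frontier := {c for c in train_classes if c}
def pvSeed (train_classes : List Int) : PySem.Set Int :=
  train_classes.foldl (fun s c => if c ≠ 0 then PySem.Set.add s c else s) PySem.Set.empty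

-- one wave: the truthy parents of frontier nodes that are not already kept
def pvNextFrontier (cp : List (Int × Int)) (keep' frontier : PySem.Set Int) : PySem.Set Int :=
  frontier.foldl (fun acc n =>
    match pvGet cp n with
    | some p => if p ≠ 0 ∧ p ∉ keep' then PySem.Set.add acc p else acc
    | none => acc) PySem.Set.empty

-- the 'while frontier:' loop of B; fuel only makes it total
def bfsB (cp : List (Int × Int)) : Nat → PySem.Set Int → PySem.Set Int → PySem.Set Int
  | 0, keep, _ => keep
  | f+1, keep, frontier =>
      if frontier.isEmpty then keep
      else
        let keep' := PySem.Set.union keep frontier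
        bfsB cp f keep' (pvNextFrontier cp keep' frontier)

def trim_hierarchy_py_alt (train_classes : List Int) (child2parent : List (Int × Int)) : List Int :=
  PySem.List.sorted
    (bfsB child2parent (train_classes.length + child2parent.length + 1) PySem.Set.empty (pvSeed train_classes))
    (fun x => x) false

-- ===== PRECONDITION & SPEC =====
-- k-fold composition of the child->parent lookup (stopping at falsy/absent nodes): used only to STATE, in the
-- precondition, that no truthy key lies on a lookup cycle of length ≤ |child2parent| — a bounded graph-shape
-- condition on the input map, not the ports' set-accumulating loops
def iterT (cp : List (Int × Int)) : Nat → Int → Option Int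
  | 0, n => some n
  | k+1, n => if n = 0 then none else
      match pvGet cp n with
      | some p => iterT cp k p
      | none => none

-- Pre_ excludes child2parent maps with a cycle of truthy nodes: when such a cycle is reachable from a truthy
-- train class, A's while loop never terminates; the acyclicity demand is conservative, so it also excludes
-- maps whose cycle is unreachable from every train class, on which A returns normally (cited in the claim).
def Pre_trim_hierarchy_py (train_classes : List Int) (child2parent : List (Int × Int)) : Prop :=
  ∀ p ∈ child2parent, p.1 ≠ 0 → ∀ j : Nat, j < child2parent.length →
    iterT child2parent (j+1) p.1 ≠ some p.1
instance (train_classes : List Int) (child2parent : List (Int × Int)) : Decidable (Pre_trim_hierarchy_py train_classes child2parent) := by unfold Pre_trim_hierarchy_py; infer_instance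

def pvWitness_trim_hierarchy_py : List Int × (List (Int × Int)) := ([1, 2], [(2, 1)])

def Spec_trim_hierarchy_py (train_classes : List Int) (child2parent : List (Int × Int)) (out : List Int) : Prop := out = trim_hierarchy_py_alt train_classes child2parent
instance (train_classes : List Int) (child2parent : List (Int × Int)) (out : List Int) : Decidable (Spec_trim_hierarchy_py train_classes child2parent out) := by unfold Spec_trim_hierarchy_py; infer_instance

-- ===== CLAIM (what is proved, stated in full; the proofs are below) =====
def Claim_equal_trim_hierarchy_py : Prop := ∀ (train_classes : List Int) (child2parent : List (Int × Int)), Dom_trim_hierarchy_py train_classes child2parent → Pre_trim_hierarchy_py train_classes child2parent → Spec_trim_hierarchy_py train_classes child2parent (trim_hierarchy_py train_classes child2parent)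

-- ===== LEMMAS AND PROOFS =====

-- x is a truthy node reachable from t along a truthy lookup chain
def ReachP (cp : List (Int × Int)) (t x : Int) : Prop := x ≠ 0 ∧ ∃ k, iterT cp k t = some x

-- universe of nodes B can ever keep
def pvU (tc : List Int) (cp : List (Int × Int)) : List Int := tc ++ cp.map Prod.snd

theorem iterT_succ_none (cp : List (Int × Int)) (k : Nat) :
    ∀ t, iterT cp k t = none → iterT cp (k+1) t = none := by
  induction k with
  | zero => intro t h; simp [iterT] at h
  | succ k ih =>
      intro t h
      simp only [iterT] at h ⊢
      split_ifs with h0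
      · rfl
      · cases hg : pvGet cp t with
        | none => rfl
        | some p => simp only [h0, if_neg, hg] at h; exact ih p h

theorem iterT_none_mono (cp : List (Int × Int)) {k m : Nat} (hkm : k ≤ m) :
    ∀ t, iterT cp k t = none → iterT cp m t = none := by
  induction m with
  | zero => intro t h; interval_cases k; exact h
  | succ m ih =>
      intro t h
      rcases Nat.lt_or_ge k (m+1) with hlt | hge
      · exact iterT_succ_none cp m t (ih (Nat.lt_succ_iff.mp hlt) t h)
      · have : k = m + 1 := le_antisymm hkm hge
        subst this; exact h

theorem iterT_add (cp : List (Int × Int)) (a b : Nat) :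
    ∀ t, iterT cp (a + b) t =
      match iterT cp a t with
      | none => none
      | some m => iterT cp b m := by
  induction a with
  | zero => intro t; simp [iterT]
  | succ a ih =>
      intro t
      rw [Nat.succ_add]
      simp only [iterT]
      split_ifs with h0
      · rfl
      · cases hg : pvGet cp t with
        | none => rfl
        | some p => exact ih p

theorem pvGet_some_mem_keys (cp : List (Int × Int)) (s p : Int) :
    pvGet cp s = some p → s ∈ cp.map Prod.fst := by
  induction cp with
  | nil => intro h; simp [pvGet, PySem.Dict.get?] at h
  | cons q qs ih =>
      intro h
      rw [pvGet, PySem.Dict.get?_mk_cons] at h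
      by_cases hq : q.1 == s
      · simp [← eq_of_beq hq]
      · rw [if_neg hq] at h
        simpa using Or.inr (ih h)

theorem pre_iterT_none (tc : List Int) (cp : List (Int × Int))
    (hpre : Pre_trim_hierarchy_py tc cp) (t : Int) :
    iterT cp (cp.length + 1) t = none := by
  by_contra hne
  have hsome : ∀ i : Nat, i ≤ cp.length + 1 → ∃ v, iterT cp i t = some v := by
    intro i hi
    cases hx : iterT cp i t with
    | none => exact absurd (iterT_none_mono cp hi t hx) hne
    | some v => exact ⟨v, rfl⟩
  have hg : ∀ i : Nat, i ≤ cp.length + 1 → iterT cp i t = some ((iterT cp i t).getD 0) := by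
    intro i hi
    obtain ⟨v, hv⟩ := hsome i hi
    rw [hv]; rfl
  have hstep : ∀ i : Nat, i ≤ cp.length →
      (iterT cp i t).getD 0 ≠ 0 ∧ (iterT cp i t).getD 0 ∈ cp.map Prod.fst := by
    intro i hi
    have hadd := iterT_add cp i 1 t
    rw [hg i (by omega)] at hadd
    dsimp only at hadd
    have h2 : iterT cp 1 ((iterT cp i t).getD 0) = some ((iterT cp (i+1) t).getD 0) := by
      rw [← hadd]; exact hg (i+1) (by omega)
    simp only [iterT] at h2
    by_cases h0 : (iterT cp i t).getD 0 = 0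
    · rw [if_pos h0] at h2; exact absurd h2 (by simp)
    · rw [if_neg h0] at h2
      cases hgg : pvGet cp ((iterT cp i t).getD 0) with
      | none => rw [hgg] at h2; exact absurd h2 (by simp)
      | some p => exact ⟨h0, pvGet_some_mem_keys cp _ p hgg⟩
  have hcard : (cp.map Prod.fst).toFinset.card < (Finset.univ : Finset (Fin (cp.length + 1))).card := by
    have h1 := List.toFinset_card_le (cp.map Prod.fst)
    simp only [List.length_map] at h1
    simp only [Finset.card_univ, Fintype.card_fin]
    omega
  obtain ⟨i, -, j, -, hij, heq⟩ :=
    Finset.exists_ne_map_eq_of_card_lt_of_maps_to hcard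
      (fun (i : Fin (cp.length + 1)) _ => List.mem_toFinset.mpr (hstep i.val (by omega)).2)
  have key : ∀ (a b : Fin (cp.length + 1)), a < b →
      (iterT cp a.val t).getD 0 = (iterT cp b.val t).getD 0 → False := by
    intro a b hab hfeq
    have hadd := iterT_add cp a.val (b.val - a.val) t
    rw [hg a.val (by omega)] at hadd
    dsimp only at hadd
    rw [show a.val + (b.val - a.val) = b.val by omega] at hadd
    have hcyc : iterT cp (b.val - a.val) ((iterT cp a.val t).getD 0) =
        some ((iterT cp a.val t).getD 0) := by
      rw [← hadd, hg b.val (by omega), hfeq]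
    obtain ⟨q, hq, hq1⟩ := List.mem_map.mp (hstep a.val (by omega)).2
    have hL1 : 1 ≤ cp.length := by
      have hne' : cp ≠ [] := List.ne_nil_of_mem hq
      have := List.length_pos_iff.mpr hne'
      omega
    have hpp := hpre q hq (by rw [hq1]; exact (hstep a.val (by omega)).1)
      (b.val - a.val - 1) (by have := a.isLt; have := b.isLt; omega)
    rw [show b.val - a.val - 1 + 1 = b.val - a.val by
      have : a.val < b.val := hab; omega, hq1] at hpp
    exact hpp hcyc
  rcases lt_or_gt_of_ne hij with h | h
  · exact key i j h heq
  · exact key j i h heq.symm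

theorem ReachP_src_ne_zero (cp : List (Int × Int)) (t x : Int) (h : ReachP cp t x) : t ≠ 0 := by
  obtain ⟨hx, k, hk⟩ := h
  cases k with
  | zero => simp [iterT] at hk; omega
  | succ k =>
      intro h0; subst h0
      simp [iterT] at hk

theorem ReachP_step (cp : List (Int × Int)) (s p x : Int)
    (hs : s ≠ 0) (hg : pvGet cp s = some p) (h : ReachP cp p x) : ReachP cp s x := by
  obtain ⟨hx, k, hk⟩ := h
  exact ⟨hx, k+1, by simp [iterT, hs, hg, hk]⟩

theorem chainA_none (cp : List (Int × Int)) (f : Nat) (keep : PySem.Set Int) :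
    chainA cp f keep none = keep := by
  cases f <;> rfl

theorem chainA_mem (cp : List (Int × Int)) :
    ∀ (f : Nat) (keep : PySem.Set Int) (t : Int), iterT cp f t = none →
      ∀ x, x ∈ chainA cp f keep (some t) ↔ x ∈ keep ∨ ReachP cp t x := by
  intro f
  induction f with
  | zero => intro keep t h; simp [iterT] at h
  | succ f ih =>
      intro keep t h x
      simp only [chainA]
      simp only [iterT] at h
      split_ifs with ht
      · -- t ≠ 0
        rw [if_neg (by simpa using ht)] at h
        cases hg : pvGet cp t with
        | none =>
            rw [chainA_none]
            constructor
            · intro hx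
              rcases (PySem.Set.mem_add keep t x).mp hx with hx | hx
              · exact Or.inl hx
              · exact Or.inr ⟨by omega, 0, by simp [iterT, hx]⟩
            · rintro (hx | ⟨hx0, k, hk⟩)
              · exact (PySem.Set.mem_add keep t x).mpr (Or.inl hx)
              · cases k with
                | zero =>
                    simp [iterT] at hk
                    exact (PySem.Set.mem_add keep t x).mpr (Or.inr hk.symm)
                | succ k =>
                    simp [iterT, ht, hg] at hk
        | some p =>
            simp only [hg] at h
            rw [ih (PySem.Set.add keep t) p h x, PySem.Set.mem_add]
            constructor
            · rintro ((hx | hx) | hr)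
              · exact Or.inl hx
              · exact Or.inr ⟨by omega, 0, by simp [iterT, hx]⟩
              · exact Or.inr (ReachP_step cp t p x ht hg hr)
            · rintro (hx | ⟨hx0, k, hk⟩)
              · exact Or.inl (Or.inl hx)
              · cases k with
                | zero =>
                    simp [iterT] at hk
                    exact Or.inl (Or.inr hk.symm)
                | succ k =>
                    simp only [iterT, if_neg ht, hg] at hk
                    exact Or.inr ⟨hx0, k, hk⟩
      · -- t = 0: loop does not run
        push_neg at ht
        constructor
        · intro hx; exact Or.inl hx
        · rintro (hx | hr)
          · exact hx
          · exact absurd ht (ReachP_src_ne_zero cp t x hr)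

theorem chainA_nodup (cp : List (Int × Int)) :
    ∀ (f : Nat) (keep : PySem.Set Int) (c : Option Int), keep.Nodup → (chainA cp f keep c).Nodup := by
  intro f
  induction f with
  | zero => intro keep c h; exact h
  | succ f ih =>
      intro keep c h
      cases c with
      | none => exact h
      | some n =>
          simp only [chainA]
          split_ifs with hn
          · exact ih _ _ (PySem.Set.nodup_add _ _ h)
          · exact h

theorem keepA_mem (tc : List Int) (cp : List (Int × Int))
    (hpre : Pre_trim_hierarchy_py tc cp) :
    ∀ (acc : PySem.Set Int) (x : Int),
      x ∈ tc.foldl (fun keep t => chainA cp (cp.length + 2) keep (some t)) acc ↔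
        x ∈ acc ∨ ∃ t ∈ tc, ReachP cp t x := by
  have hall : ∀ u : Int, iterT cp (cp.length + 2) u = none :=
    fun u => iterT_none_mono cp (by omega) u (pre_iterT_none tc cp hpre u)
  clear hpre
  induction tc with
  | nil => intro acc x; simp
  | cons t ts ih =>
      intro acc x
      simp only [List.foldl_cons]
      rw [ih _ x, chainA_mem cp _ acc t (hall t) x]
      constructor
      · rintro ((hx | hr) | ⟨s, hs, hr⟩)
        · exact Or.inl hx
        · exact Or.inr ⟨t, by simp, hr⟩
        · exact Or.inr ⟨s, by simp [hs], hr⟩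
      · rintro (hx | ⟨s, hs, hr⟩)
        · exact Or.inl (Or.inl hx)
        · rcases List.mem_cons.mp hs with rfl | hs
          · exact Or.inl (Or.inr hr)
          · exact Or.inr ⟨s, hs, hr⟩

theorem keepA_nodup (tc : List Int) (cp : List (Int × Int)) :
    ∀ (acc : PySem.Set Int), acc.Nodup →
      (tc.foldl (fun keep t => chainA cp (cp.length + 2) keep (some t)) acc).Nodup := by
  induction tc with
  | nil => intro acc h; exact h
  | cons t ts ih => intro acc h; exact ih _ (chainA_nodup cp _ _ _ h)

theorem seed_mem (tc : List Int) :
    ∀ x, x ∈ pvSeed tc ↔ x ∈ tc ∧ x ≠ 0 := by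
  have gen : ∀ (l : List Int) (acc : PySem.Set Int) (x : Int),
      x ∈ l.foldl (fun s c => if c ≠ 0 then PySem.Set.add s c else s) acc ↔
        x ∈ acc ∨ (x ∈ l ∧ x ≠ 0) := by
    intro l
    induction l with
    | nil => intro acc x; simp
    | cons c cs ih =>
        intro acc x
        simp only [List.foldl_cons]
        rw [ih]
        split_ifs with hc
        · rw [PySem.Set.mem_add]
          constructor
          · rintro ((hx | rfl) | hx)
            · exact Or.inl hx
            · exact Or.inr ⟨by simp, hc⟩
            · exact Or.inr ⟨by simp [hx.1], hx.2⟩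
          · rintro (hx | ⟨hm, hx0⟩)
            · exact Or.inl (Or.inl hx)
            · rcases List.mem_cons.mp hm with rfl | hm
              · exact Or.inl (Or.inr rfl)
              · exact Or.inr ⟨hm, hx0⟩
        · push_neg at hc
          constructor
          · rintro (hx | hx)
            · exact Or.inl hx
            · exact Or.inr ⟨by simp [hx.1], hx.2⟩
          · rintro (hx | ⟨hm, hx0⟩)
            · exact Or.inl hx
            · rcases List.mem_cons.mp hm with rfl | hm
              · omega
              · exact Or.inr ⟨hm, hx0⟩
  intro x
  rw [pvSeed, gen]
  simp

theorem nextFrontier_mem (cp : List (Int × Int)) (keep' frontier : PySem.Set Int) :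
    ∀ x, x ∈ pvNextFrontier cp keep' frontier ↔
      ∃ s ∈ frontier, pvGet cp s = some x ∧ x ≠ 0 ∧ x ∉ keep' := by
  have gen : ∀ (l : List Int) (acc : PySem.Set Int) (x : Int),
      x ∈ l.foldl (fun acc n =>
        match pvGet cp n with
        | some p => if p ≠ 0 ∧ p ∉ keep' then PySem.Set.add acc p else acc
        | none => acc) acc ↔
        x ∈ acc ∨ ∃ s ∈ l, pvGet cp s = some x ∧ x ≠ 0 ∧ x ∉ keep' := by
    intro l
    induction l with
    | nil => intro acc x; simp
    | cons n ns ih =>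
        intro acc x
        simp only [List.foldl_cons]
        rw [ih]
        have step : ∀ y : Int, y ∈ (match pvGet cp n with
            | some p => if p ≠ 0 ∧ p ∉ keep' then PySem.Set.add acc p else acc
            | none => acc) ↔
            y ∈ acc ∨ (pvGet cp n = some y ∧ y ≠ 0 ∧ y ∉ keep') := by
          intro y
          cases hg : pvGet cp n with
          | none => simp [hg]
          | some p =>
              simp only []
              split_ifs with hp
              · rw [PySem.Set.mem_add]
                constructor
                · rintro (hy | rfl)
                  · exact Or.inl hy
                  · exact Or.inr ⟨rfl, hp.1, hp.2⟩
                · rintro (hy | ⟨he, h0, hk⟩)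
                  · exact Or.inl hy
                  · exact Or.inr (Option.some_inj.mp he).symm
              · constructor
                · exact Or.inl
                · rintro (hy | ⟨he, h0, hk⟩)
                  · exact hy
                  · cases Option.some_inj.mp he
                    exact absurd ⟨h0, hk⟩ hp
        rw [step x]
        constructor
        · rintro ((hx | hx) | ⟨s, hs, h⟩)
          · exact Or.inl hx
          · exact Or.inr ⟨n, by simp, hx⟩
          · exact Or.inr ⟨s, by simp [hs], h⟩
        · rintro (hx | ⟨s, hs, h⟩)
          · exact Or.inl (Or.inl hx)
          · rcases List.mem_cons.mp hs with rfl | hs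
            · exact Or.inl (Or.inr h)
            · exact Or.inr ⟨s, hs, h⟩
  intro x
  rw [pvNextFrontier, gen]
  simp

theorem pvGet_some_mem_values (cp : List (Int × Int)) (s p : Int) :
    pvGet cp s = some p → p ∈ cp.map Prod.snd := by
  induction cp with
  | nil => intro h; simp [pvGet, PySem.Dict.get?] at h
  | cons q qs ih =>
      intro h
      rw [pvGet, PySem.Dict.get?_mk_cons] at h
      by_cases hq : q.1 == s
      · rw [if_pos hq] at h
        simp [← Option.some_inj.mp h]
      · rw [if_neg hq] at h
        simpa using Or.inr (ih h)

theorem bfs_escape (cp : List (Int × Int)) (keep frontier frontier' : PySem.Set Int)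
    (hcl : ∀ n, (n ∈ keep ∨ n ∈ frontier) → ∀ p, pvGet cp n = some p →
        p = 0 ∨ (p ∈ keep ∨ p ∈ frontier) ∨ p ∈ frontier') :
    ∀ (k : Nat) (t x : Int), (t ∈ keep ∨ t ∈ frontier) → iterT cp k t = some x → x ≠ 0 →
      (x ∈ keep ∨ x ∈ frontier) ∨ ∃ t' ∈ frontier', ReachP cp t' x := by
  intro k
  induction k with
  | zero =>
      intro t x ht hit _
      simp [iterT] at hit
      exact Or.inl (hit ▸ ht)
  | succ k ih =>
      intro t x ht hit hx
      simp only [iterT] at hit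
      by_cases ht0 : t = 0
      · rw [if_pos ht0] at hit; exact absurd hit (by simp)
      · rw [if_neg ht0] at hit
        cases hg : pvGet cp t with
        | none => rw [hg] at hit; exact absurd hit (by simp)
        | some p =>
            rw [hg] at hit
            rcases hcl t ht p hg with hp0 | hp | hp
            · subst hp0
              cases k with
              | zero => simp [iterT] at hit; omega
              | succ k => simp [iterT] at hit
            · exact ih p x hp hit hx
            · exact Or.inr ⟨p, hp, hx, k, hit⟩

theorem bfs_mem (cp : List (Int × Int)) (tc : List Int) :
    ∀ (f : Nat) (keep frontier : PySem.Set Int),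
      (∀ x ∈ keep, x ∈ pvU tc cp) → (∀ x ∈ frontier, x ∈ pvU tc cp) →
      (∀ x ∈ frontier, x ∉ keep) → (∀ x ∈ frontier, x ≠ 0) →
      (∀ n ∈ keep, ∀ p, pvGet cp n = some p → p = 0 ∨ p ∈ keep ∨ p ∈ frontier) →
      ((pvU tc cp).toFinset.card + 1 ≤ f + keep.toFinset.card) →
      ∀ x, x ∈ bfsB cp f keep frontier ↔ x ∈ keep ∨ ∃ t ∈ frontier, ReachP cp t x := by
  intro f
  induction f with
  | zero =>
      intro keep frontier hUk _ _ _ _ hf x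
      exfalso
      have hsub : keep.toFinset ⊆ (pvU tc cp).toFinset :=
        fun y hy => List.mem_toFinset.mpr (hUk y (List.mem_toFinset.mp hy))
      have := Finset.card_le_card hsub
      omega
  | succ f ih =>
      intro keep frontier hUk hUf hdisj htr hcl hf x
      simp only [bfsB]
      split_ifs with hemp
      · have hfr0 : frontier = [] := List.isEmpty_iff.mp hemp
        subst hfr0; simp
      · have hfr : frontier ≠ [] := fun h => hemp (by simp [h])
        have hmemk' : ∀ y, y ∈ PySem.Set.union keep frontier ↔ y ∈ keep ∨ y ∈ frontier :=
          PySem.Set.mem_union keep frontier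
        have hfr'mem := nextFrontier_mem cp (PySem.Set.union keep frontier) frontier
        have hUk' : ∀ y ∈ PySem.Set.union keep frontier, y ∈ pvU tc cp := by
          intro y hy
          rcases (hmemk' y).mp hy with hy | hy
          · exact hUk y hy
          · exact hUf y hy
        have hUf' : ∀ y ∈ pvNextFrontier cp (PySem.Set.union keep frontier) frontier, y ∈ pvU tc cp := by
          intro y hy
          obtain ⟨s, _, hgs, _, _⟩ := (hfr'mem y).mp hy
          exact List.mem_append.mpr (Or.inr (pvGet_some_mem_values cp s y hgs))
        have hdisj' : ∀ y ∈ pvNextFrontier cp (PySem.Set.union keep frontier) frontier,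
            y ∉ PySem.Set.union keep frontier := by
          intro y hy
          obtain ⟨s, _, _, _, hnk⟩ := (hfr'mem y).mp hy
          exact hnk
        have htr' : ∀ y ∈ pvNextFrontier cp (PySem.Set.union keep frontier) frontier, y ≠ 0 := by
          intro y hy
          obtain ⟨s, _, _, h0, _⟩ := (hfr'mem y).mp hy
          exact h0
        have hcl' : ∀ n ∈ PySem.Set.union keep frontier, ∀ p, pvGet cp n = some p →
            p = 0 ∨ p ∈ PySem.Set.union keep frontier ∨
              p ∈ pvNextFrontier cp (PySem.Set.union keep frontier) frontier := by
          intro n hn p hp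
          rcases (hmemk' n).mp hn with hn' | hn'
          · rcases hcl n hn' p hp with h | h | h
            · exact Or.inl h
            · exact Or.inr (Or.inl ((hmemk' p).mpr (Or.inl h)))
            · exact Or.inr (Or.inl ((hmemk' p).mpr (Or.inr h)))
          · by_cases hp0 : p = 0
            · exact Or.inl hp0
            · by_cases hpk : p ∈ PySem.Set.union keep frontier
              · exact Or.inr (Or.inl hpk)
              · exact Or.inr (Or.inr ((hfr'mem p).mpr ⟨n, hn', hp, hp0, hpk⟩))
        have hfcard : (pvU tc cp).toFinset.card + 1 ≤
            f + (PySem.Set.union keep frontier).toFinset.card := by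
          obtain ⟨e, he⟩ := List.exists_mem_of_ne_nil frontier hfr
          have hsub : keep.toFinset ⊆ (PySem.Set.union keep frontier).toFinset := by
            intro y hy
            exact List.mem_toFinset.mpr ((hmemk' y).mpr (Or.inl (List.mem_toFinset.mp hy)))
          have hss : keep.toFinset ⊂ (PySem.Set.union keep frontier).toFinset := by
            refine ⟨hsub, fun hsup => ?_⟩
            have he' : e ∈ keep.toFinset :=
              hsup (List.mem_toFinset.mpr ((hmemk' e).mpr (Or.inr he)))
            exact hdisj e he (List.mem_toFinset.mp he')
          have := Finset.card_lt_card hss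
          omega
        rw [ih (PySem.Set.union keep frontier)
            (pvNextFrontier cp (PySem.Set.union keep frontier) frontier)
            hUk' hUf' hdisj' htr' hcl' hfcard x]
        constructor
        · rintro (hx | ⟨t, htm, hr⟩)
          · rcases (hmemk' x).mp hx with hx' | hx'
            · exact Or.inl hx'
            · exact Or.inr ⟨x, hx', htr x hx', 0, rfl⟩
          · obtain ⟨s, hs, hgs, _, _⟩ := (hfr'mem t).mp htm
            exact Or.inr ⟨s, hs, ReachP_step cp s t x (htr s hs) hgs hr⟩
        · rintro (hx | ⟨t, htm, hx0, k, hk⟩)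
          · exact Or.inl ((hmemk' x).mpr (Or.inl hx))
          · have hcl2 : ∀ n, (n ∈ keep ∨ n ∈ frontier) → ∀ p, pvGet cp n = some p →
                p = 0 ∨ (p ∈ keep ∨ p ∈ frontier) ∨
                  p ∈ pvNextFrontier cp (PySem.Set.union keep frontier) frontier := by
              intro n hn p hp
              rcases hn with hn | hn
              · rcases hcl n hn p hp with h | h | h
                · exact Or.inl h
                · exact Or.inr (Or.inl (Or.inl h))
                · exact Or.inr (Or.inl (Or.inr h))
              · by_cases hp0 : p = 0
                · exact Or.inl hp0
                · by_cases hpk : p ∈ PySem.Set.union keep frontier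
                  · exact Or.inr (Or.inl ((hmemk' p).mp hpk))
                  · exact Or.inr (Or.inr ((hfr'mem p).mpr ⟨n, hn, hp, hp0, hpk⟩))
            rcases bfs_escape cp keep frontier
                (pvNextFrontier cp (PySem.Set.union keep frontier) frontier) hcl2
                k t x (Or.inr htm) hk hx0 with h | h
            · exact Or.inl ((hmemk' x).mpr h)
            · exact Or.inr h

theorem bfs_nodup (cp : List (Int × Int)) :
    ∀ (f : Nat) (keep frontier : PySem.Set Int), keep.Nodup → (bfsB cp f keep frontier).Nodup := by
  intro f
  induction f with
  | zero => intro keep frontier h; exact h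
  | succ f ih =>
      intro keep frontier h
      simp only [bfsB]
      split_ifs with he
      · exact h
      · exact ih _ _ (PySem.Set.nodup_union _ _ h)

-- ===== VERDICT (by name: the statement is the Claim_ definition above) =====
theorem trim_hierarchy_py_spec : Claim_equal_trim_hierarchy_py := by
  intro tc cp _hdom hpre
  unfold Spec_trim_hierarchy_py trim_hierarchy_py trim_hierarchy_py_alt
  apply PySem.List.sorted_eq_sorted_of_perm
  · exact fun a b h => h
  · have ndA := keepA_nodup tc cp PySem.Set.empty List.nodup_nil
    have ndB := bfs_nodup cp (tc.length + cp.length + 1) PySem.Set.empty (pvSeed tc) List.nodup_nil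
    refine (List.perm_ext_iff_of_nodup ndA ndB).mpr ?_
    intro a
    rw [keepA_mem tc cp hpre PySem.Set.empty a]
    rw [bfs_mem cp tc (tc.length + cp.length + 1) PySem.Set.empty (pvSeed tc)
      (by intro y hy; simp [PySem.Set.empty] at hy)
      (by intro y hy; exact List.mem_append.mpr (Or.inl ((seed_mem tc y).mp hy).1))
      (by intro y hy; simp [PySem.Set.empty])
      (by intro y hy; exact ((seed_mem tc y).mp hy).2)
      (by intro n hn; simp [PySem.Set.empty] at hn)
      (by
        have h1 := List.toFinset_card_le (pvU tc cp)
        have h2 : (pvU tc cp).length = tc.length + cp.length := by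
          simp [pvU]
        omega)
      a]
    simp only [PySem.Set.empty, List.not_mem_nil, false_or]
    constructor
    · rintro ⟨t, ht, hr⟩
      exact ⟨t, (seed_mem tc t).mpr ⟨ht, ReachP_src_ne_zero cp t a hr⟩, hr⟩
    · rintro ⟨t, ht, hr⟩
      exact ⟨t, ((seed_mem tc t).mp ht).1, hr⟩
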